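-- pv_equiv track=rewrite | github.com/N4tzz-Official/N4tzzhash | N4tzzhash.py | evalTransformations
-- ===== SOURCE A (Python) =====
-- transformations = [
--     {'a': ['@', '4']},
--     {'b': '8'},
--     {'e': '3'},
--     {'g': ['9', '6']},
--     {'i': ['1', '!']},
--     {'o': '0'},
--     {'s': ['$', '5']},
--     {'t': '7'}
-- ]
--
-- def evalTransformations(w):
--     trans_chars = []
--     total = 1
--     c = 0
--     w = list(w)
--
--     for char in w:
--         for t in transformations:
--             if char in t.keys():
--                 trans_chars.append(c)
--                 if isinstance(t[char], list):
--                     total *= len(t[char])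
--                 else:
--                     total *= 2
--         c += 1
--
--     return [trans_chars, total]
-- ===== SOURCE B (Python) =====
-- KEYS = 'abegiost'
--
-- def evalTransformations(w):
--     positions = []
--     for k in KEYS:
--         positions.extend(i for i, ch in enumerate(w) if ch == k)
--     positions.sort()
--     return [positions, 2 ** len(positions)]
-- ===== Notes on version B (the rewrite author's own statement) =====
-- stated objective: alternative
-- what changed: Instead of one pass over the characters with an inner scan of the transformation table and a running product, B makes one pass per transformable letter collecting that letter's positions, merges the eight position lists, sorts them, and computes the count as 2**len (every table entry has exactly 2 variants).
import Mathlib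
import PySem

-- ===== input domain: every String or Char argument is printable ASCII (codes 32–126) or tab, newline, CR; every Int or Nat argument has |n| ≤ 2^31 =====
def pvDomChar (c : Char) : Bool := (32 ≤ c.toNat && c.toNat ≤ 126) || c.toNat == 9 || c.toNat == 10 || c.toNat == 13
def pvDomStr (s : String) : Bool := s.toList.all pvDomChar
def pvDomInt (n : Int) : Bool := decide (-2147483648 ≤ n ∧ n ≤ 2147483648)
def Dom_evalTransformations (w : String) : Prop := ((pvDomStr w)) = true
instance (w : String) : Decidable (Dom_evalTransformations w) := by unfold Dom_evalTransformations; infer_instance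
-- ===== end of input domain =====

-- B replaces A's per-character pass (inner table scan, running product) by one pass
-- per transformable letter collecting that letter's positions, a sort of the merged
-- lists, and 2^count (objective: alternative algorithm, similar cost).

-- ===== PORT A =====
-- value of a transformation entry: either a Python list of strings or a single string
inductive TVal
  | ls : List String → TVal
  | st : String → TVal
deriving DecidableEq, Repr

-- the module-level `transformations` table: a list of one-entry dicts
def transformationsA : List (PySem.Dict Char TVal) :=
  [ PySem.Dict.mk [('a', TVal.ls ["@", "4"])]
  , PySem.Dict.mk [('b', TVal.st "8")]
  , PySem.Dict.mk [('e', TVal.st "3")]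
  , PySem.Dict.mk [('g', TVal.ls ["9", "6"])]
  , PySem.Dict.mk [('i', TVal.ls ["1", "!"])]
  , PySem.Dict.mk [('o', TVal.st "0")]
  , PySem.Dict.mk [('s', TVal.ls ["$", "5"])]
  , PySem.Dict.mk [('t', TVal.st "7")] ]

-- inner `for t in transformations` loop body over state (trans_chars, total), c fixed
def innerA (char : Char) (c : Int) (p : List Int × Int) : List Int × Int :=
  transformationsA.foldl (fun p t =>
    match PySem.Dict.get? t char with
    | some v =>
        (p.1 ++ [c],
         p.2 * (match v with
                | TVal.ls l => (l.length : Int)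
                | TVal.st _ => 2))
    | none => p) p

-- one iteration of the outer `for char in w` loop
def stepA (s : List Int × Int × Int) (char : Char) : List Int × Int × Int :=
  let p := innerA char s.2.2 (s.1, s.2.1)
  (p.1, p.2, s.2.2 + 1)

def evalTransformations (w : String) : List Int × Int :=
  let st := w.toList.foldl stepA ([], 1, 0)
  (st.1, st.2.1)

-- ===== PORT B =====
-- KEYS = 'abegiost'
def keysB : List Char := ['a', 'b', 'e', 'g', 'i', 'o', 's', 't']

-- positions of the single letter k in the word: `(i for i, ch in enumerate(w) if ch == k)`
def occB (l : List Char) (k : Char) : List Int :=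
  (PySem.List.enumerate l).filterMap (fun p => if p.2 = k then some p.1 else none)

def evalTransformations_alt (w : String) : List Int × Int :=
  let positions :=
    PySem.List.sorted (keysB.foldl (fun acc k => acc ++ occB w.toList k) []) (fun x => x) false
  (positions, 2 ^ positions.length)

-- ===== PRECONDITION & SPEC =====
def Spec_evalTransformations (w : String) (out : List Int × Int) : Prop := out = evalTransformations_alt w
instance (w : String) (out : List Int × Int) : Decidable (Spec_evalTransformations w out) := by unfold Spec_evalTransformations; infer_instance

-- ===== CLAIM (what is proved, stated in full; the proofs are below) =====
def Claim_equal_evalTransformations : Prop := ∀ (w : String), Dom_evalTransformations w → Spec_evalTransformations w (evalTransformations w)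

-- ===== LEMMAS AND PROOFS =====

-- indices (counting from c) of chars satisfying P
def idxsP (P : Char → Bool) (c : Int) : List Char → List Int
  | [] => []
  | ch :: l => (if P ch then [c] else []) ++ idxsP P (c + 1) l

def memKeys (ch : Char) : Bool := decide (ch ∈ keysB)

lemma idxsP_congr (p q : Char → Bool) (h : ∀ ch, p ch = q ch) (c : Int) (l : List Char) :
    idxsP p c l = idxsP q c l := by
  induction l generalizing c with
  | nil => rfl
  | cons ch l ih => simp [idxsP, h ch, ih]

lemma inner_eq (char : Char) (c : Int) (tc : List Int) (total : Int) :
    innerA char c (tc, total) =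
      if memKeys char then (tc ++ [c], total * 2) else (tc, total) := by
  by_cases h : char ∈ keysB
  · have hm : memKeys char = true := by simp [memKeys, h]
    simp only [keysB, List.mem_cons, List.not_mem_nil, or_false] at h
    rcases h with h | h | h | h | h | h | h | h <;> subst h <;>
      simp [innerA, transformationsA, PySem.Dict.get?, hm]
  · have hm : memKeys char = false := by simp [memKeys, h]
    have h' := h
    simp only [keysB, List.mem_cons, List.not_mem_nil, or_false, not_or] at h'
    obtain ⟨h1, h2, h3, h4, h5, h6, h7, h8⟩ := h'
    have g1 : ¬('a' = char) := fun e => h1 e.symm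
    have g2 : ¬('b' = char) := fun e => h2 e.symm
    have g3 : ¬('e' = char) := fun e => h3 e.symm
    have g4 : ¬('g' = char) := fun e => h4 e.symm
    have g5 : ¬('i' = char) := fun e => h5 e.symm
    have g6 : ¬('o' = char) := fun e => h6 e.symm
    have g7 : ¬('s' = char) := fun e => h7 e.symm
    have g8 : ¬('t' = char) := fun e => h8 e.symm
    simp [innerA, transformationsA, PySem.Dict.get?, hm, g1, g2, g3, g4, g5, g6, g7, g8]

lemma stepA_eq (tc : List Int) (total c : Int) (ch : Char) :
    stepA (tc, total, c) ch =
      if memKeys ch then (tc ++ [c], total * 2, c + 1) else (tc, total, c + 1) := by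
  simp only [stepA, inner_eq]
  by_cases h : memKeys ch <;> simp [h]

lemma loopA_eq (l : List Char) (tc : List Int) (total : Int) (c : Int) :
    l.foldl stepA (tc, total, c) =
      (tc ++ idxsP memKeys c l, total * 2 ^ (idxsP memKeys c l).length, c + l.length) := by
  induction l generalizing tc total c with
  | nil => simp [idxsP]
  | cons ch l ih =>
    rw [List.foldl_cons, stepA_eq]
    by_cases h : memKeys ch
    · rw [if_pos h, ih]
      refine Prod.ext ?_ (Prod.ext ?_ ?_)
      · simp [idxsP, h]
      · simp only [idxsP, if_pos h]; simp [pow_succ]; ring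
      · simp; omega
    · rw [if_neg h, ih]
      refine Prod.ext ?_ (Prod.ext ?_ ?_)
      · simp [idxsP, h]
      · simp [idxsP, h]
      · simp; omega

-- B side: positions of one letter
lemma occB_eq (l : List Char) (k : Char) (c : Int) :
    (PySem.List.enumerate l c).filterMap
      (fun p => if p.2 = k then some p.1 else none) = idxsP (fun ch => decide (ch = k)) c l := by
  induction l generalizing c with
  | nil => simp [PySem.List.enumerate_nil, idxsP]
  | cons ch l ih =>
    simp only [PySem.List.enumerate_cons, List.filterMap_cons, idxsP]
    by_cases h : ch = k <;> simp [h, ih]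

-- splitting a disjunctive predicate permutes the index lists
lemma idxsP_or_perm (p q : Char → Bool) (hd : ∀ ch, ¬(p ch = true ∧ q ch = true))
    (l : List Char) (c : Int) :
    (idxsP (fun ch => p ch || q ch) c l).Perm (idxsP p c l ++ idxsP q c l) := by
  induction l generalizing c with
  | nil => simp [idxsP]
  | cons ch l ih =>
    by_cases hp : p ch
    · have hq : q ch = false := by
        cases hqv : q ch
        · rfl
        · exact absurd ⟨hp, hqv⟩ (hd ch)
      simpa [idxsP, hp, hq] using (ih (c + 1)).cons c
    · by_cases hq : q ch
      · simp only [idxsP, hp, hq, Bool.or_true, if_pos, List.singleton_append]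
        exact ((ih (c + 1)).cons c).trans List.perm_middle.symm
      · simpa [idxsP, hp, hq] using ih (c + 1)

-- flatMap over distinct keys vs one membership pass
lemma flatMap_perm (ks : List Char) (hnd : ks.Nodup) (l : List Char) (c : Int) :
    (ks.flatMap (fun k => idxsP (fun ch => decide (ch = k)) c l)).Perm
      (idxsP (fun ch => decide (ch ∈ ks)) c l) := by
  induction ks with
  | nil =>
    simp only [List.flatMap_nil]
    have : idxsP (fun ch => decide (ch ∈ ([] : List Char))) c l = idxsP (fun _ => false) c l := by
      apply idxsP_congr; intro ch; simp
    rw [this]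
    have : idxsP (fun _ => false) c l = [] := by
      induction l generalizing c with
      | nil => rfl
      | cons ch t ih => simp [idxsP, ih]
    simp [this]
  | cons k ks ih =>
    have hk : k ∉ ks := (List.nodup_cons.mp hnd).1
    have hnd' : ks.Nodup := (List.nodup_cons.mp hnd).2
    have hcongr : idxsP (fun ch => decide (ch ∈ k :: ks)) c l =
        idxsP (fun ch => decide (ch = k) || decide (ch ∈ ks)) c l := by
      apply idxsP_congr; intro ch; simp [List.mem_cons]
    rw [List.flatMap_cons, hcongr]
    have hdisj : ∀ ch, ¬((decide (ch = k)) = true ∧ (decide (ch ∈ ks)) = true) := by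
      intro ch ⟨h1, h2⟩
      simp only [decide_eq_true_eq] at h1 h2
      exact hk (h1 ▸ h2)
    exact ((((ih hnd').append_left _)).trans
      (idxsP_or_perm (fun ch => decide (ch = k)) (fun ch => decide (ch ∈ ks)) hdisj l c).symm)

-- idxsP is strictly increasing and bounded below by c
lemma idxsP_pairwise (P : Char → Bool) (l : List Char) (c : Int) :
    (idxsP P c l).Pairwise (· < ·) ∧ ∀ x ∈ idxsP P c l, c ≤ x := by
  induction l generalizing c with
  | nil => simp [idxsP]
  | cons ch l ih =>
    obtain ⟨hpw, hlb⟩ := ih (c + 1)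
    by_cases h : P ch
    · refine ⟨?_, ?_⟩
      · simp only [idxsP, h, if_pos, List.singleton_append]
        exact List.pairwise_cons.mpr ⟨fun x hx => by have := hlb x hx; omega, hpw⟩
      · intro x hx
        simp only [idxsP, h, if_pos, List.singleton_append, List.mem_cons] at hx
        rcases hx with rfl | hx
        · omega
        · have := hlb x hx; omega
    · refine ⟨?_, ?_⟩
      · simpa [idxsP, h] using hpw
      · intro x hx
        simp only [idxsP, h, if_neg, Bool.false_eq_true, not_false_iff, List.nil_append] at hx
        have := hlb x hx; omega

-- ===== VERDICT (by name: the statement is the Claim_ definition above) =====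
theorem evalTransformations_spec : Claim_equal_evalTransformations := by
  intro w _
  unfold Spec_evalTransformations evalTransformations evalTransformations_alt
  have hfold : keysB.foldl (fun acc k => acc ++ occB w.toList k) [] =
      keysB.flatMap (occB w.toList) := by
    simpa using PySem.List.foldl_append_eq_flatMap (occB w.toList) keysB []
  have hocc : keysB.flatMap (occB w.toList) =
      keysB.flatMap (fun k => idxsP (fun ch => decide (ch = k)) 0 w.toList) := by
    apply List.flatMap_congr; intro k _; exact occB_eq w.toList k 0
  have hnd : keysB.Nodup := by decide
  have hpw := (idxsP_pairwise memKeys w.toList 0).1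
  have hperm' : (idxsP memKeys 0 w.toList).Perm (keysB.flatMap (occB w.toList)) := by
    rw [hocc]
    have h := flatMap_perm keysB hnd w.toList 0
    have he : idxsP (fun ch => decide (ch ∈ keysB)) 0 w.toList = idxsP memKeys 0 w.toList := rfl
    exact (he ▸ h).symm
  have hsorted : PySem.List.sorted (keysB.foldl (fun acc k => acc ++ occB w.toList k) [])
      (fun x => x) false = idxsP memKeys 0 w.toList := by
    rw [hfold]
    exact PySem.List.sorted_eq_of_perm_of_pairwise_lt _ _ (fun x => x) hperm' (by simpa using hpw)
  simp only [loopA_eq, hsorted, List.nil_append, one_mul]
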